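-- pv_equiv track=rewrite | github.com/tobiasosborne/tstournament | ts-bench-infra/problems/07-blossom/reference/blossom_reference.py | _collapse_parallel
-- ===== SOURCE A (Python) =====
-- def _collapse_parallel(n: int, edges: list[tuple[int, int, int]]) -> dict[int, dict[int, int]]:
--     adj: dict[int, dict[int, int]] = {i: {} for i in range(n)}
--     for u, v, w in edges:
--         if u == v or not (0 <= u < n) or not (0 <= v < n):
--             continue
--         if v in adj[u]:
--             if w > adj[u][v]:
--                 adj[u][v] = w
--                 adj[v][u] = w
--         else:
--             adj[u][v] = w
--             adj[v][u] = w
--     return adj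
-- ===== SOURCE B (Python) =====
-- def _collapse_parallel(n: int, edges: list[tuple[int, int, int]]) -> dict[int, dict[int, int]]:
--     # Group-then-reduce: phase 1 distributes each valid edge into per-node
--     # incidence lists; phase 2 reduces each node's list to a neighbour -> max
--     # weight dict, instead of A's fused pass with symmetric nested-dict writes.
--     inc: dict[int, list[tuple[int, int]]] = {i: [] for i in range(n)}
--     for u, v, w in edges:
--         if u == v or not (0 <= u < n) or not (0 <= v < n):
--             continue
--         inc[u].append((v, w))
--         inc[v].append((u, w))
--     out: dict[int, dict[int, int]] = {}
--     for i in range(n):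
--         d: dict[int, int] = {}
--         for j, w in inc[i]:
--             if j not in d or w > d[j]:
--                 d[j] = w
--         out[i] = d
--     return out
-- ===== Notes on version B (the rewrite author's own statement) =====
-- stated objective: alternative
-- what changed: Replaces A's single fused pass that mutates a shared nested dict with symmetric double writes by a group-then-reduce pipeline: one pass distributes each valid edge into per-node incidence lists, then a second phase independently reduces each node's list to its neighbour-to-max-weight dict.
import Mathlib
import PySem

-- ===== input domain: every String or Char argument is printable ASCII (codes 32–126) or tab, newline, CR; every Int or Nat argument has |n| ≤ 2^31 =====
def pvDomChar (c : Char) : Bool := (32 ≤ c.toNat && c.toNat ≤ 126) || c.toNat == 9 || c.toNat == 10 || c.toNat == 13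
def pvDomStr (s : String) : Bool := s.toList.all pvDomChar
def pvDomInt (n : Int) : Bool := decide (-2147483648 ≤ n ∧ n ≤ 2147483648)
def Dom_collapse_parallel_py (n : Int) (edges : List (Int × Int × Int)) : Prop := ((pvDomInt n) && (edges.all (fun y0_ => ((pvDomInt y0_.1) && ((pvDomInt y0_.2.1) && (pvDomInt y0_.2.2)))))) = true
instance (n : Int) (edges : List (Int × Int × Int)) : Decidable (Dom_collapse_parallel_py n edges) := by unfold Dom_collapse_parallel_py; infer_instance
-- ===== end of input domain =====

-- B replaces A's single fused edge pass with symmetric writes into a shared nested dict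
-- by a group-then-reduce pipeline (incidence lists first, then per-node max reduction);
-- alternative decomposition of the same cost.

-- ===== PORT A =====
-- one iteration of A's edge loop (adj[u] always exists when the edge is valid, so
-- Dict.modify with default ∅ is exact for Python's in-place adj[u][v] = w)
def pvStepA (n : Int) (adj : PySem.Dict Int (PySem.Dict Int Int)) (e : Int × Int × Int) :
    PySem.Dict Int (PySem.Dict Int Int) :=
  let u := e.1; let v := e.2.1; let w := e.2.2
  if u = v ∨ ¬(0 ≤ u ∧ u < n) ∨ ¬(0 ≤ v ∧ v < n) then adj
  else
    match ((adj.getD u PySem.Dict.empty).get? v) with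
    | some x =>
        if w > x then
          (adj.modify u PySem.Dict.empty (fun d => d.insert v w)).modify v PySem.Dict.empty
            (fun d => d.insert u w)
        else adj
    | none =>
        (adj.modify u PySem.Dict.empty (fun d => d.insert v w)).modify v PySem.Dict.empty
          (fun d => d.insert u w)

def collapse_parallel_py (n : Int) (edges : List (Int × Int × Int)) : List (Int × List (Int × Int)) :=
  let adj0 : PySem.Dict Int (PySem.Dict Int Int) :=
    (PySem.List.pyRange 0 n 1).foldl (fun d i => d.insert i PySem.Dict.empty) PySem.Dict.empty
  let adj := edges.foldl (pvStepA n) adj0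
  adj.items.map (fun p => (p.1, p.2.items))

-- ===== PORT B =====
-- phase 1, one edge: distribute a valid edge into both endpoints' incidence lists
-- (inc[u] always exists for a valid edge, so Dict.modify with default [] is exact
-- for Python's in-place inc[u].append((v, w)))
def pvIncStep (n : Int) (inc : PySem.Dict Int (List (Int × Int))) (e : Int × Int × Int) :
    PySem.Dict Int (List (Int × Int)) :=
  let u := e.1; let v := e.2.1; let w := e.2.2
  if u = v ∨ ¬(0 ≤ u ∧ u < n) ∨ ¬(0 ≤ v ∧ v < n) then inc
  else (inc.modify u [] (fun l => l ++ [(v, w)])).modify v [] (fun l => l ++ [(u, w)])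

-- phase 2, one incidence entry: keep the max weight per neighbour
def pvReduce (d : PySem.Dict Int Int) (p : Int × Int) : PySem.Dict Int Int :=
  if (match d.get? p.1 with | none => true | some x => p.2 > x) then d.insert p.1 p.2 else d

def collapse_parallel_py_alt (n : Int) (edges : List (Int × Int × Int)) : List (Int × List (Int × Int)) :=
  let inc0 : PySem.Dict Int (List (Int × Int)) :=
    (PySem.List.pyRange 0 n 1).foldl (fun d i => d.insert i ([] : List (Int × Int))) PySem.Dict.empty
  let inc := edges.foldl (pvIncStep n) inc0
  (PySem.List.pyRange 0 n 1).map
    (fun i => (i, ((inc.getD i []).foldl pvReduce PySem.Dict.empty).items))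

-- ===== PRECONDITION & SPEC =====
def Spec_collapse_parallel_py (n : Int) (edges : List (Int × Int × Int)) (out : List (Int × List (Int × Int))) : Prop := out = collapse_parallel_py_alt n edges
instance (n : Int) (edges : List (Int × Int × Int)) (out : List (Int × List (Int × Int))) : Decidable (Spec_collapse_parallel_py n edges out) := by unfold Spec_collapse_parallel_py; infer_instance

-- ===== CLAIM (what is proved, stated in full; the proofs are below) =====
def Claim_equal_collapse_parallel_py : Prop := ∀ (n : Int) (edges : List (Int × Int × Int)), Dom_collapse_parallel_py n edges → Spec_collapse_parallel_py n edges (collapse_parallel_py n edges)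

-- ===== LEMMAS AND PROOFS =====

-- proof-side middle form: what one edge does to the row of a single node i
def pvStepRow (n i : Int) (d : PySem.Dict Int Int) (e : Int × Int × Int) : PySem.Dict Int Int :=
  let u := e.1; let v := e.2.1; let w := e.2.2
  if u = v ∨ ¬(0 ≤ u ∧ u < n) ∨ ¬(0 ≤ v ∧ v < n) then d
  else if u = i then
    (if (match d.get? v with | none => true | some x => w > x) then d.insert v w else d)
  else if v = i then
    (if (match d.get? u with | none => true | some x => w > x) then d.insert u w else d)
  else d

-- invariant of A's adjacency structure: it is symmetric at every point of the loop
def pvSym (adj : PySem.Dict Int (PySem.Dict Int Int)) : Prop :=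
  ∀ a b : Int, ((adj.getD a PySem.Dict.empty).get? b) = ((adj.getD b PySem.Dict.empty).get? a)

-- pointwise (per outer key) description of one step of A's loop
lemma pvGetD_stepA (n : Int) (adj : PySem.Dict Int (PySem.Dict Int Int)) (e : Int × Int × Int)
    (i : Int) :
    (pvStepA n adj e).getD i PySem.Dict.empty =
      if e.1 = e.2.1 ∨ ¬(0 ≤ e.1 ∧ e.1 < n) ∨ ¬(0 ≤ e.2.1 ∧ e.2.1 < n) then
        adj.getD i PySem.Dict.empty
      else if (match ((adj.getD e.1 PySem.Dict.empty).get? e.2.1) with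
               | none => true | some x => e.2.2 > x) then
        (if i = e.2.1 then (adj.getD e.2.1 PySem.Dict.empty).insert e.1 e.2.2
         else if i = e.1 then (adj.getD e.1 PySem.Dict.empty).insert e.2.1 e.2.2
         else adj.getD i PySem.Dict.empty)
      else adj.getD i PySem.Dict.empty := by
  unfold pvStepA
  by_cases hval : e.1 = e.2.1 ∨ ¬(0 ≤ e.1 ∧ e.1 < n) ∨ ¬(0 ≤ e.2.1 ∧ e.2.1 < n)
  · rw [if_pos hval, if_pos hval]
  · have hne : e.1 ≠ e.2.1 := by tauto
    rw [if_neg hval, if_neg hval]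
    rcases hm : (adj.getD e.1 PySem.Dict.empty).get? e.2.1 with _ | x
    · simp [PySem.Dict.getD_modify, Ne.symm hne]
    · by_cases hw : e.2.2 > x
      · simp [hw, PySem.Dict.getD_modify, Ne.symm hne]
      · simp [hw]

-- the symmetric double write preserves pvSym
lemma pvSym_upd (adj : PySem.Dict Int (PySem.Dict Int Int)) (u v w : Int) (hne : u ≠ v)
    (h : pvSym adj) (a b : Int) :
    ((if a = v then (adj.getD v PySem.Dict.empty).insert u w
      else if a = u then (adj.getD u PySem.Dict.empty).insert v w
      else adj.getD a PySem.Dict.empty).get? b) =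
    ((if b = v then (adj.getD v PySem.Dict.empty).insert u w
      else if b = u then (adj.getD u PySem.Dict.empty).insert v w
      else adj.getD b PySem.Dict.empty).get? a) := by
  by_cases hav : a = v <;> by_cases hau : a = u <;>
  by_cases hbv : b = v <;> by_cases hbu : b = u <;>
  simp_all [PySem.Dict.get?_insert] <;>
  exact h _ _

lemma pvSym_stepA (n : Int) (adj : PySem.Dict Int (PySem.Dict Int Int)) (e : Int × Int × Int)
    (h : pvSym adj) : pvSym (pvStepA n adj e) := by
  intro a b
  rw [pvGetD_stepA, pvGetD_stepA]
  by_cases hval : e.1 = e.2.1 ∨ ¬(0 ≤ e.1 ∧ e.1 < n) ∨ ¬(0 ≤ e.2.1 ∧ e.2.1 < n)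
  · rw [if_pos hval, if_pos hval]; exact h a b
  · have hne : e.1 ≠ e.2.1 := by tauto
    rw [if_neg hval, if_neg hval]
    rcases hm : (adj.getD e.1 PySem.Dict.empty).get? e.2.1 with _ | x
    · simpa using pvSym_upd adj e.1 e.2.1 e.2.2 hne h a b
    · by_cases hw : e.2.2 > x
      · simpa [hw] using pvSym_upd adj e.1 e.2.1 e.2.2 hne h a b
      · simpa [hw] using h a b

-- on a symmetric adjacency, one step of A acts on each row exactly as pvStepRow
lemma pvStep_agree (n : Int) (adj : PySem.Dict Int (PySem.Dict Int Int)) (e : Int × Int × Int)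
    (i : Int) (h : pvSym adj) :
    (pvStepA n adj e).getD i PySem.Dict.empty =
      pvStepRow n i (adj.getD i PySem.Dict.empty) e := by
  rw [pvGetD_stepA]
  unfold pvStepRow
  by_cases hval : e.1 = e.2.1 ∨ ¬(0 ≤ e.1 ∧ e.1 < n) ∨ ¬(0 ≤ e.2.1 ∧ e.2.1 < n)
  · rw [if_pos hval, if_pos hval]
  · have hne : e.1 ≠ e.2.1 := by tauto
    rw [if_neg hval, if_neg hval]
    by_cases hui : e.1 = i
    · subst hui
      simp [hne]
    · rw [if_neg hui]
      by_cases hvi : e.2.1 = i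
      · subst hvi
        rw [if_pos rfl, h e.2.1 e.1]
        simp
      · rw [if_neg hvi]
        simp [Ne.symm hui, Ne.symm hvi]

-- A's loop never touches the outer key set once every node 0..n-1 is present
lemma pvKeys_stepA (n : Int) (adj : PySem.Dict Int (PySem.Dict Int Int)) (e : Int × Int × Int)
    (hcov : ∀ k : Int, 0 ≤ k → k < n → adj.contains k = true) :
    (pvStepA n adj e).keys = adj.keys := by
  unfold pvStepA
  by_cases hval : e.1 = e.2.1 ∨ ¬(0 ≤ e.1 ∧ e.1 < n) ∨ ¬(0 ≤ e.2.1 ∧ e.2.1 < n)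
  · rw [if_pos hval]
  · rw [if_neg hval]
    have hu : adj.contains e.1 = true := hcov _ (by tauto) (by tauto)
    have hv : adj.contains e.2.1 = true := hcov _ (by tauto) (by tauto)
    have hupd :
        ((adj.modify e.1 PySem.Dict.empty (fun d => d.insert e.2.1 e.2.2)).modify e.2.1
            PySem.Dict.empty (fun d => d.insert e.1 e.2.2)).keys = adj.keys := by
      rw [PySem.Dict.keys_modify, PySem.Dict.keys_insert_of_contains _ _
            (by rw [PySem.Dict.contains_modify]; simp [hv]),
          PySem.Dict.keys_modify, PySem.Dict.keys_insert_of_contains _ _ hu]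
    rcases (adj.getD e.1 PySem.Dict.empty).get? e.2.1 with _ | x
    · exact hupd
    · by_cases hw : e.2.2 > x
      · simpa [hw] using hupd
      · simp [hw]

lemma pvKeys_foldl (n : Int) (es : List (Int × Int × Int))
    (adj : PySem.Dict Int (PySem.Dict Int Int))
    (hcov : ∀ k : Int, 0 ≤ k → k < n → adj.contains k = true) :
    (es.foldl (pvStepA n) adj).keys = adj.keys := by
  induction es generalizing adj with
  | nil => rfl
  | cons e es ih =>
      simp only [List.foldl_cons]
      have hk := pvKeys_stepA n adj e hcov
      rw [ih _ (fun k h0 h1 => by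
            rw [PySem.Dict.contains_iff_mem_keys, hk,
                ← PySem.Dict.contains_iff_mem_keys]
            exact hcov k h0 h1), hk]

-- A's whole loop, read at any outer key i, is the row loop for i
lemma pvMain (n : Int) (es : List (Int × Int × Int)) (adj : PySem.Dict Int (PySem.Dict Int Int))
    (h : pvSym adj) (i : Int) :
    (es.foldl (pvStepA n) adj).getD i PySem.Dict.empty =
      es.foldl (pvStepRow n i) (adj.getD i PySem.Dict.empty) := by
  induction es generalizing adj with
  | nil => rfl
  | cons e es ih =>
      simp only [List.foldl_cons]
      rw [ih _ (pvSym_stepA n adj e h), pvStep_agree n adj e i h]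

-- what one edge contributes to node i's incidence list in B's first phase
def pvContrib (n i : Int) (e : Int × Int × Int) : List (Int × Int) :=
  if e.1 = e.2.1 ∨ ¬(0 ≤ e.1 ∧ e.1 < n) ∨ ¬(0 ≤ e.2.1 ∧ e.2.1 < n) then []
  else if e.1 = i then [(e.2.1, e.2.2)]
  else if e.2.1 = i then [(e.1, e.2.2)]
  else []

lemma pvGetD_incStep (n : Int) (inc : PySem.Dict Int (List (Int × Int))) (e : Int × Int × Int)
    (i : Int) :
    (pvIncStep n inc e).getD i [] = inc.getD i [] ++ pvContrib n i e := by
  unfold pvIncStep pvContrib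
  by_cases hval : e.1 = e.2.1 ∨ ¬(0 ≤ e.1 ∧ e.1 < n) ∨ ¬(0 ≤ e.2.1 ∧ e.2.1 < n)
  · rw [if_pos hval, if_pos hval]; simp
  · have hne : e.1 ≠ e.2.1 := by tauto
    rw [if_neg hval, if_neg hval]
    by_cases hui : e.1 = i
    · subst hui
      simp [PySem.Dict.getD_modify, hne]
    · by_cases hvi : e.2.1 = i
      · subst hvi
        simp [PySem.Dict.getD_modify, hui, Ne.symm hne]
      · simp [PySem.Dict.getD_modify, Ne.symm hui, Ne.symm hvi, hui, hvi]

lemma pvGetD_incFoldl (n : Int) (es : List (Int × Int × Int))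
    (inc : PySem.Dict Int (List (Int × Int))) (i : Int) :
    (es.foldl (pvIncStep n) inc).getD i [] = inc.getD i [] ++ es.flatMap (pvContrib n i) := by
  induction es generalizing inc with
  | nil => simp
  | cons e es ih =>
      simp only [List.foldl_cons, List.flatMap_cons]
      rw [ih, pvGetD_incStep, List.append_assoc]

-- reducing one edge's contribution is exactly the row step
lemma pvReduce_contrib (n i : Int) (d : PySem.Dict Int Int) (e : Int × Int × Int) :
    (pvContrib n i e).foldl pvReduce d = pvStepRow n i d e := by
  unfold pvContrib pvStepRow
  by_cases hval : e.1 = e.2.1 ∨ ¬(0 ≤ e.1 ∧ e.1 < n) ∨ ¬(0 ≤ e.2.1 ∧ e.2.1 < n)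
  · rw [if_pos hval, if_pos hval]; rfl
  · rw [if_neg hval, if_neg hval]
    by_cases hui : e.1 = i
    · rw [if_pos hui, if_pos hui]; rfl
    · rw [if_neg hui, if_neg hui]
      by_cases hvi : e.2.1 = i
      · rw [if_pos hvi, if_pos hvi]; rfl
      · rw [if_neg hvi, if_neg hvi]; rfl

-- B's phase-2 reduction of node i's incidence list is the row loop for i
lemma pvReduce_flatMap (n i : Int) (es : List (Int × Int × Int)) (d : PySem.Dict Int Int) :
    (es.flatMap (pvContrib n i)).foldl pvReduce d = es.foldl (pvStepRow n i) d := by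
  induction es generalizing d with
  | nil => rfl
  | cons e es ih =>
      simp only [List.flatMap_cons, List.foldl_cons, List.foldl_append]
      rw [pvReduce_contrib, ih]

-- ===== VERDICT (by name: the statement is the Claim_ definition above) =====
theorem collapse_parallel_py_spec : Claim_equal_collapse_parallel_py := by
  intro n edges _
  unfold Spec_collapse_parallel_py
  set R := PySem.List.pyRange 0 n 1 with hR
  -- A's initial adjacency: every node 0..n-1 mapped to an empty dict
  set adj0 : PySem.Dict Int (PySem.Dict Int Int) :=
    R.foldl (fun d i => d.insert i PySem.Dict.empty) PySem.Dict.empty with hadj0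
  have hitems0 : adj0.items = R.map (fun i => (i, (PySem.Dict.empty : PySem.Dict Int Int))) := by
    simpa using PySem.Dict.items_foldl_insert_fresh R id
      (fun _ => (PySem.Dict.empty : PySem.Dict Int Int)) PySem.Dict.empty
      (fun a _ => PySem.Dict.contains_empty a)
      (by simpa using PySem.List.nodup_pyRange_one 0 n)
  have hkeys0 : adj0.keys = R := by
    simp [PySem.Dict.keys, hitems0, Function.comp_def]
  have hnodup0 : adj0.keys.Nodup := by
    rw [hkeys0]; exact PySem.List.nodup_pyRange_one 0 n
  have hget0 : ∀ a : Int, adj0.getD a PySem.Dict.empty = PySem.Dict.empty := by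
    intro a
    by_cases hc : adj0.contains a = true
    · have ha : a ∈ R := by rwa [PySem.Dict.contains_iff_mem_keys, hkeys0] at hc
      exact PySem.Dict.getD_of_mem_items adj0
        (by rw [hitems0]; exact List.mem_map.mpr ⟨a, ha, rfl⟩) hnodup0 _
    · exact PySem.Dict.getD_of_not_contains adj0 _ (by simpa using hc)
  have hsym0 : pvSym adj0 := by
    intro a b; rw [hget0 a, hget0 b]; simp [PySem.Dict.get?_empty]
  have hcov : ∀ k : Int, 0 ≤ k → k < n → adj0.contains k = true := by
    intro k h0 h1
    rw [PySem.Dict.contains_iff_mem_keys, hkeys0, hR]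
    exact PySem.List.mem_pyRange_one.mpr ⟨h0, h1⟩
  -- B's initial incidence table: every node 0..n-1 mapped to []
  set inc0 : PySem.Dict Int (List (Int × Int)) :=
    R.foldl (fun d i => d.insert i ([] : List (Int × Int))) PySem.Dict.empty with hinc0
  have hitemsI : inc0.items = R.map (fun i => (i, ([] : List (Int × Int)))) := by
    simpa using PySem.Dict.items_foldl_insert_fresh R id
      (fun _ => ([] : List (Int × Int))) PySem.Dict.empty
      (fun a _ => PySem.Dict.contains_empty a)
      (by simpa using PySem.List.nodup_pyRange_one 0 n)
  have hkeysI : inc0.keys = R := by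
    simp [PySem.Dict.keys, hitemsI, Function.comp_def]
  have hnodupI : inc0.keys.Nodup := by
    rw [hkeysI]; exact PySem.List.nodup_pyRange_one 0 n
  have hgetI : ∀ a : Int, inc0.getD a [] = [] := by
    intro a
    by_cases hc : inc0.contains a = true
    · have ha : a ∈ R := by rwa [PySem.Dict.contains_iff_mem_keys, hkeysI] at hc
      exact PySem.Dict.getD_of_mem_items inc0
        (by rw [hitemsI]; exact List.mem_map.mpr ⟨a, ha, rfl⟩) hnodupI _
    · exact PySem.Dict.getD_of_not_contains inc0 _ (by simpa using hc)
  set adjA := edges.foldl (pvStepA n) adj0 with hadjA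
  set inc := edges.foldl (pvIncStep n) inc0 with hinc
  have hA : collapse_parallel_py n edges = adjA.items.map (fun p => (p.1, p.2.items)) := rfl
  have hB : collapse_parallel_py_alt n edges =
      R.map (fun i => (i, ((inc.getD i []).foldl pvReduce PySem.Dict.empty).items)) := rfl
  rw [hA, hB]
  have hkeysA : adjA.keys = R := by rw [hadjA, pvKeys_foldl n edges adj0 hcov, hkeys0]
  have hnodupA : adjA.keys.Nodup := by rw [hkeysA]; exact PySem.List.nodup_pyRange_one 0 n
  have hitemsA := PySem.Dict.items_eq_map_keys adjA hnodupA PySem.Dict.empty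
  rw [hitemsA, hkeysA, List.map_map]
  apply List.map_congr_left
  intro k hk
  simp only [Function.comp]
  rw [hadjA, pvMain n edges adj0 hsym0 k, hget0 k,
      hinc, pvGetD_incFoldl, hgetI k, List.nil_append, pvReduce_flatMap]
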